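-- pv_equiv track=rewrite | github.com/lightorange0v0/deeplearning_postech | he_test_by_depth.py | get_units_equal
-- ===== SOURCE A (Python) =====
-- def get_total_params_function(depth, units):
--     total_params = 0
--
--     for layer in range(1, depth + 2):
--         params = units[layer] * ( units[layer - 1] + 1 )
--         total_params += params
--
--     return total_params
--
-- def get_units_equal(input_size, output_size, depth, params_limit=15500):
--     units = [input_size]
--     possible_num_of_unit = 0
--     test = 1
--
--     while True:
--         test_units = [input_size] + [test] * depth + [output_size]
--         test_params = get_total_params_function(depth, test_units)
--
--         if test_params > params_limit:
--             break
--         else: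
--             possible_num_of_unit = test
--             test += 1
--
--     units.extend([possible_num_of_unit] * depth)
--     units.append(output_size)
--
--     return units
-- ===== SOURCE B (Python) =====
-- def get_units_equal(input_size, output_size, depth, params_limit=15500):
--     # Hidden-layer parameter count for uniform width t is the quadratic
--     #   f(t) = (depth-1)*t^2 + (input_size+depth+output_size)*t + output_size,
--     # so instead of scanning t = 1, 2, 3, ... we binary-search the largest
--     # feasible t after an exponential bracket.
--     if depth <= 0:
--         return [input_size, output_size]
--     a = depth - 1
--     b = input_size + depth + output_size
--     c = output_size
--
--     def f(t):
--         return a * t * t + b * t + c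
--
--     if f(1) > params_limit:
--         best = 0
--     else:
--         lo, hi = 1, 2
--         while f(hi) <= params_limit:
--             lo, hi = hi, hi * 2
--         while lo + 1 < hi:
--             mid = (lo + hi) // 2
--             if f(mid) <= params_limit:
--                 lo = mid
--             else:
--                 hi = mid
--         best = lo
--     return [input_size] + [best] * depth + [output_size]
-- ===== Notes on version B (the rewrite author's own statement) =====
-- stated objective: faster
-- what changed: A scans candidate widths t = 1,2,3,... recomputing the whole layer-parameter sum for each; B uses the closed-form quadratic f(t) = (depth-1)t^2 + (input_size+depth+output_size)t + output_size for the parameter count and finds the largest feasible width by exponential bracketing plus binary search.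
import Mathlib
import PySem

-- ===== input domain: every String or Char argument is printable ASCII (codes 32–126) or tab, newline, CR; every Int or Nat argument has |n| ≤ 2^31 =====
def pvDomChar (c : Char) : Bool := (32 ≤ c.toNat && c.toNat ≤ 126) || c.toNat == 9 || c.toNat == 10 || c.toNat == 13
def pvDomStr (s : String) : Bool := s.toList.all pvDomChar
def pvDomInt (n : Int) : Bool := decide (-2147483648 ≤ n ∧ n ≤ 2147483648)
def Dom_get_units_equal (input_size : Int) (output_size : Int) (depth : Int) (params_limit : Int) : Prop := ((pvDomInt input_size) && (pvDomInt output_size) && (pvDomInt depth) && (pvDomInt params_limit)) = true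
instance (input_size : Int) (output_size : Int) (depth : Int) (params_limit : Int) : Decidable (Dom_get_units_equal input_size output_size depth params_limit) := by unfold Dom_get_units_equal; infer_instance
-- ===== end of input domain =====

-- B replaces A's linear scan over candidate widths by a closed-form quadratic for the
-- parameter count plus exponential bracketing and binary search (objective: faster).

-- ===== PORT A =====
-- indices 'layer' / 'layer - 1' are always in range on every reachable call, so pyGetD 0 is exact
def get_total_params_function (depth : Int) (units : List Int) : Int :=
  (PySem.List.pyRange 1 (depth + 2) 1).foldl
    (fun total_params layer =>
      total_params +
        PySem.List.pyGetD units layer 0 * (PySem.List.pyGetD units (layer - 1) 0 + 1))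
    0

-- A's 'while True' loop, with fuel (pvAFuel is proved sufficient on every input of Pre_)
def pvALoop (input_size output_size depth params_limit : Int)
    (possible_num_of_unit test : Int) : Nat → Int
  | 0 => possible_num_of_unit
  | fuel + 1 =>
    let test_units := [input_size] ++ List.replicate depth.toNat test ++ [output_size]
    let test_params := get_total_params_function depth test_units
    if test_params > params_limit then possible_num_of_unit
    else pvALoop input_size output_size depth params_limit test (test + 1) fuel

def pvAFuel (input_size output_size depth params_limit : Int) : Nat :=
  (|input_size| + 2 * |output_size| + |depth| + |params_limit|).toNat + 4

def get_units_equal (input_size : Int) (output_size : Int) (depth : Int) (params_limit : Int) : List Int :=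
  let possible_num_of_unit :=
    pvALoop input_size output_size depth params_limit 0 1
      (pvAFuel input_size output_size depth params_limit)
  ([input_size] ++ List.replicate depth.toNat possible_num_of_unit) ++ [output_size]

-- ===== PORT B =====
def pvQuad (a b c t : Int) : Int := a * t * t + b * t + c

-- Source B's 'while f(hi) <= params_limit' doubling loop, with fuel (sufficient on Dom ∩ Pre_)
def pvExpSearch (a b c limit : Int) (lo hi : Int) : Nat → Int × Int
  | 0 => (lo, hi)
  | fuel + 1 =>
    if pvQuad a b c hi ≤ limit then pvExpSearch a b c limit hi (hi * 2) fuel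
    else (lo, hi)

-- Source B's 'while lo + 1 < hi' bisection loop, with fuel (sufficient on Dom ∩ Pre_)
def pvBinSearch (a b c limit : Int) (lo hi : Int) : Nat → Int
  | 0 => lo
  | fuel + 1 =>
    if lo + 1 < hi then
      let mid := PySem.Int.floordiv (lo + hi) 2
      if pvQuad a b c mid ≤ limit then pvBinSearch a b c limit mid hi fuel
      else pvBinSearch a b c limit lo mid fuel
    else lo

def get_units_equal_alt (input_size : Int) (output_size : Int) (depth : Int) (params_limit : Int) : List Int :=
  if depth ≤ 0 then [input_size, output_size]
  else
    let a := depth - 1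
    let b := input_size + depth + output_size
    let c := output_size
    let best :=
      if pvQuad a b c 1 > params_limit then 0
      else
        let p := pvExpSearch a b c params_limit 1 2 70
        pvBinSearch a b c params_limit p.1 p.2 80
    [input_size] ++ List.replicate depth.toNat best ++ [output_size]

-- ===== PRECONDITION & SPEC =====
-- Pre_ is exactly the closed-form termination domain of A's while-loop: outside it the tested
-- parameter count never exceeds params_limit and A loops forever (it returns on no excluded input).
def Pre_get_units_equal (input_size : Int) (output_size : Int) (depth : Int) (params_limit : Int) : Prop :=
  (depth ≤ -1 ∧ params_limit < 0) ∨
  (depth = 0 ∧ params_limit < output_size * (input_size + 1)) ∨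
  (depth = 1 ∧ (0 ≤ input_size + output_size ∨ params_limit < input_size + 2 * output_size + 1)) ∨
  2 ≤ depth

instance (input_size : Int) (output_size : Int) (depth : Int) (params_limit : Int) : Decidable (Pre_get_units_equal input_size output_size depth params_limit) := by
  unfold Pre_get_units_equal; infer_instance

def pvWitness_get_units_equal : Int × Int × Int × Int := (3, 2, 2, 100)

def Spec_get_units_equal (input_size : Int) (output_size : Int) (depth : Int) (params_limit : Int) (out : List Int) : Prop := out = get_units_equal_alt input_size output_size depth params_limit
instance (input_size : Int) (output_size : Int) (depth : Int) (params_limit : Int) (out : List Int) : Decidable (Spec_get_units_equal input_size output_size depth params_limit out) := by unfold Spec_get_units_equal; infer_instance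

-- ===== CLAIM (what is proved, stated in full; the proofs are below) =====
def Claim_equal_get_units_equal : Prop := ∀ (input_size : Int) (output_size : Int) (depth : Int) (params_limit : Int), Dom_get_units_equal input_size output_size depth params_limit → Pre_get_units_equal input_size output_size depth params_limit → Spec_get_units_equal input_size output_size depth params_limit (get_units_equal input_size output_size depth params_limit)

-- ===== LEMMAS AND PROOFS =====

-- element values of the units list [i] ++ [t]*d ++ [o]
lemma pv_u_get (d : Nat) (i t o : Int) (k : Nat) (hk : k ≤ d + 1) :
    PySem.List.pyGetD (i :: (List.replicate d t ++ [o])) (k : Int) 0 =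
      if k = 0 then i else if k ≤ d then t else o := by
  rw [PySem.List.pyGetD_natCast]
  rcases k with _ | j
  · simp
  · simp only [List.getD_cons_succ]
    rcases lt_or_ge j d with h | h
    · have hv : (List.replicate d t ++ [o]).getD j 0 = t := by
        rw [List.getD_eq_getElem?_getD, List.getElem?_append_left (by simpa using h),
            List.getElem?_replicate]
        simp [h]
      rw [hv, if_neg (by omega), if_pos (by omega)]
    · have hjd : j = d := by omega
      have hv : (List.replicate d t ++ [o]).getD j 0 = o := by
        rw [hjd, List.getD_eq_getElem?_getD, List.getElem?_append_right (by simp)]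
        simp
      rw [hv, if_neg (by omega), if_neg (by omega)]

-- partial sums of A's per-layer parameter terms over layers 1..n, n ≤ d
lemma pv_fold_inner (i t o : Int) (d : Nat) (hd : 1 ≤ d) :
    ∀ n : Nat, 1 ≤ n → n ≤ d →
      (PySem.List.pyRange 1 ((n : Int) + 1) 1).foldl
        (fun total_params layer =>
          total_params +
            PySem.List.pyGetD (i :: (List.replicate d t ++ [o])) layer 0 *
              (PySem.List.pyGetD (i :: (List.replicate d t ++ [o])) (layer - 1) 0 + 1))
        0
      = t * (i + 1) + ((n : Int) - 1) * (t * (t + 1)) := by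
  intro n h1 hnd
  induction n with
  | zero => omega
  | succ m ih =>
    rcases Nat.eq_zero_or_pos m with hm | hm
    · subst hm
      rw [show (((0 + 1 : Nat)) : Int) + 1 = 1 + 1 from by norm_num,
          PySem.List.pyRange_one_singleton]
      simp only [List.foldl_cons, List.foldl_nil]
      have h1' : PySem.List.pyGetD (i :: (List.replicate d t ++ [o])) 1 0 = t := by
        rw [show (1 : Int) = ((1 : Nat) : Int) from rfl, pv_u_get d i t o 1 (by omega),
            if_neg (by omega), if_pos (by omega)]
      have h0' : PySem.List.pyGetD (i :: (List.replicate d t ++ [o])) (1 - 1) 0 = i := by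
        rw [show (1 : Int) - 1 = ((0 : Nat) : Int) from by norm_num, pv_u_get d i t o 0 (by omega),
            if_pos rfl]
      rw [h1', h0']
      push_cast
      ring
    · have hrange : PySem.List.pyRange 1 (((m + 1 : Nat) : Int) + 1) 1 =
          PySem.List.pyRange 1 ((m : Int) + 1) 1 ++ [((m : Int) + 1)] := by
        push_cast
        rw [PySem.List.pyRange_one_succ_right (by push_cast; omega)]
      rw [hrange, List.foldl_append, ih hm (by omega)]
      simp only [List.foldl_cons, List.foldl_nil]
      have ha : PySem.List.pyGetD (i :: (List.replicate d t ++ [o])) ((m : Int) + 1) 0 = t := by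
        rw [show ((m : Int) + 1) = ((m + 1 : Nat) : Int) from by norm_num,
            pv_u_get d i t o (m + 1) (by omega), if_neg (by omega), if_pos (by omega)]
      have hb : PySem.List.pyGetD (i :: (List.replicate d t ++ [o])) ((m : Int) + 1 - 1) 0 = t := by
        rw [show ((m : Int) + 1 - 1) = ((m : Nat) : Int) from by norm_num,
            pv_u_get d i t o m (by omega), if_neg (by omega), if_pos (by omega)]
      rw [ha, hb]
      push_cast
      ring

-- closed form of A's parameter count: the quadratic pvQuad (d-1) (i+d+o) o t
lemma pv_gtp_eq (d : Nat) (hd : 1 ≤ d) (i t o : Int) :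
    get_total_params_function (d : Int) (i :: (List.replicate d t ++ [o])) =
      pvQuad ((d : Int) - 1) (i + (d : Int) + o) o t := by
  unfold get_total_params_function
  have hrange : PySem.List.pyRange 1 ((d : Int) + 2) 1 =
      PySem.List.pyRange 1 ((d : Int) + 1) 1 ++ [((d : Int) + 1)] := by
    rw [show ((d : Int) + 2) = ((d : Int) + 1) + 1 from by ring,
        PySem.List.pyRange_one_succ_right (by push_cast; omega)]
  rw [hrange, List.foldl_append, pv_fold_inner i t o d hd d hd (le_refl d)]
  simp only [List.foldl_cons, List.foldl_nil]
  have ha : PySem.List.pyGetD (i :: (List.replicate d t ++ [o])) ((d : Int) + 1) 0 = o := by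
    rw [show ((d : Int) + 1) = ((d + 1 : Nat) : Int) from by norm_num,
        pv_u_get d i t o (d + 1) (by omega), if_neg (by omega), if_neg (by omega)]
  have hb : PySem.List.pyGetD (i :: (List.replicate d t ++ [o])) ((d : Int) + 1 - 1) 0 = t := by
    rw [show ((d : Int) + 1 - 1) = ((d : Nat) : Int) from by norm_num,
        pv_u_get d i t o d (by omega), if_neg (by omega), if_pos (by omega)]
  rw [ha, hb]
  unfold pvQuad
  ring

-- convexity: with 0 ≤ a, on [1, v] the quadratic is below the max of its endpoint values
lemma pv_quad_interval (a b c lim u v : Int) (ha : 0 ≤ a) (hu : 1 ≤ u) (huv : u ≤ v)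
    (h1 : pvQuad a b c 1 ≤ lim) (hv : pvQuad a b c v ≤ lim) : pvQuad a b c u ≤ lim := by
  unfold pvQuad at *
  rcases lt_or_ge 0 (a * (u + 1) + b) with h | h
  · have hpos : 0 ≤ a * (u + v) + b := by nlinarith [mul_le_mul_of_nonneg_left (by omega : u + 1 ≤ u + v) ha]
    have hs : 0 ≤ (v - u) * (a * (u + v) + b) := mul_nonneg (by omega) hpos
    nlinarith [hs]
  · have hs : (u - 1) * (a * (u + 1) + b) ≤ 0 := mul_nonpos_of_nonneg_of_nonpos (by omega) (by omega)
    nlinarith [hs]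

-- past |b|+|c|+|lim|+1 the quadratic exceeds lim (the crossing bound / fuel bound)
lemma pv_quad_big (a b c lim : Int) (ha : 0 ≤ a) (hab : 1 ≤ a ∨ 1 ≤ b)
    (t : Int) (ht : |b| + |c| + |lim| + 1 ≤ t) : lim < pvQuad a b c t := by
  have hb1 : -|b| ≤ b := neg_abs_le b
  have hc1 : -|c| ≤ c := neg_abs_le c
  have hl1 : lim ≤ |lim| := le_abs_self lim
  have hb0 : 0 ≤ |b| := abs_nonneg b
  have hc0 : 0 ≤ |c| := abs_nonneg c
  have hl0 : 0 ≤ |lim| := abs_nonneg lim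
  have ht1 : 1 ≤ t := by omega
  unfold pvQuad
  rcases hab with h | h
  · nlinarith [mul_le_mul_of_nonneg_right (by linarith : (1 : Int) ≤ t)
      (by linarith : (0 : Int) ≤ t - |b|), mul_self_nonneg t]
  · nlinarith [mul_self_nonneg t]

-- A's loop returns the width one below the first t with f(t) > lim (or 0 when f(1) > lim)
lemma pv_aloop_char (i o d lim : Int) (hd : 1 ≤ d) (M : Int)
    (hM : ∀ t, M ≤ t → lim < pvQuad (d - 1) (i + d + o) o t) :
    ∀ (fuel : Nat) (test : Int), 1 ≤ test →
      (∀ s, 1 ≤ s → s < test → pvQuad (d - 1) (i + d + o) o s ≤ lim) →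
      M ≤ test + (fuel : Int) →
      (pvALoop i o d lim (test - 1) test fuel = 0 ∧ lim < pvQuad (d - 1) (i + d + o) o 1) ∨
      (1 ≤ pvALoop i o d lim (test - 1) test fuel ∧
        pvQuad (d - 1) (i + d + o) o (pvALoop i o d lim (test - 1) test fuel) ≤ lim ∧
        lim < pvQuad (d - 1) (i + d + o) o (pvALoop i o d lim (test - 1) test fuel + 1)) := by
  intro fuel
  induction fuel with
  | zero =>
    intro test h1 hinv hMf
    simp only [pvALoop]
    have hnp : lim < pvQuad (d - 1) (i + d + o) o test := hM test (by push_cast at hMf; omega)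
    rcases eq_or_lt_of_le h1 with h | h
    · left
      refine ⟨by omega, ?_⟩
      have ht1 : test = 1 := h.symm
      rw [ht1] at hnp
      exact hnp
    · right
      have hsub : test - 1 + 1 = test := by omega
      refine ⟨by omega, hinv (test - 1) (by omega) (by omega), ?_⟩
      rw [hsub]
      exact hnp
  | succ fuel ih =>
    intro test h1 hinv hMf
    simp only [pvALoop]
    have htp : get_total_params_function d ([i] ++ List.replicate d.toNat test ++ [o]) =
        pvQuad (d - 1) (i + d + o) o test := by
      have hdn : ((d.toNat : Nat) : Int) = d := Int.toNat_of_nonneg (by omega)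
      calc get_total_params_function d ([i] ++ List.replicate d.toNat test ++ [o])
          = get_total_params_function ((d.toNat : Nat) : Int)
              (i :: (List.replicate d.toNat test ++ [o])) := by rw [hdn]; rfl
        _ = pvQuad (((d.toNat : Nat) : Int) - 1) (i + ((d.toNat : Nat) : Int) + o) o test :=
              pv_gtp_eq d.toNat (by omega) i test o
        _ = pvQuad (d - 1) (i + d + o) o test := by rw [hdn]
    rw [htp]
    by_cases hbr : pvQuad (d - 1) (i + d + o) o test > lim
    · rw [if_pos hbr]
      rcases eq_or_lt_of_le h1 with h | h
      · left
        refine ⟨by omega, ?_⟩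
        have ht1 : test = 1 := h.symm
        rw [ht1] at hbr
        exact hbr
      · right
        have hsub : test - 1 + 1 = test := by omega
        refine ⟨by omega, hinv (test - 1) (by omega) (by omega), ?_⟩
        rw [hsub]
        exact hbr
    · rw [if_neg hbr]
      have := ih (test + 1) (by omega)
        (fun s hs1 hs2 => by
          rcases lt_or_ge s test with h | h
          · exact hinv s hs1 h
          · have : s = test := by omega
            subst this; omega)
        (by push_cast at hMf ⊢; omega)
      simpa using this

-- when f(1) > lim, A's loop breaks immediately with 0
lemma pv_aloop_break1 (i o d lim : Int) (hd : 1 ≤ d) (fuel : Nat)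
    (h1 : lim < pvQuad (d - 1) (i + d + o) o 1) :
    pvALoop i o d lim 0 1 (fuel + 1) = 0 := by
  simp only [pvALoop]
  have hdn : ((d.toNat : Nat) : Int) = d := Int.toNat_of_nonneg (by omega)
  have htp : get_total_params_function d ([i] ++ List.replicate d.toNat 1 ++ [o]) =
      pvQuad (d - 1) (i + d + o) o 1 := by
    calc get_total_params_function d ([i] ++ List.replicate d.toNat 1 ++ [o])
        = get_total_params_function ((d.toNat : Nat) : Int)
            (i :: (List.replicate d.toNat 1 ++ [o])) := by rw [hdn]; rfl
      _ = pvQuad (((d.toNat : Nat) : Int) - 1) (i + ((d.toNat : Nat) : Int) + o) o 1 :=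
            pv_gtp_eq d.toNat (by omega) i 1 o
      _ = pvQuad (d - 1) (i + d + o) o 1 := by rw [hdn]
  rw [htp, if_pos (by omega)]

-- the doubling loop brackets the crossing: returns (lo, hi) with f(lo) ≤ lim < f(hi), and hi bounded
lemma pv_exp_char (a b c lim M : Int) (hM : ∀ t, M ≤ t → lim < pvQuad a b c t) :
    ∀ (fuel : Nat) (lo hi : Int), 1 ≤ lo → lo < hi → pvQuad a b c lo ≤ lim →
      M ≤ hi * 2 ^ fuel →
      (1 ≤ (pvExpSearch a b c lim lo hi fuel).1 ∧
       (pvExpSearch a b c lim lo hi fuel).1 < (pvExpSearch a b c lim lo hi fuel).2 ∧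
       pvQuad a b c (pvExpSearch a b c lim lo hi fuel).1 ≤ lim ∧
       lim < pvQuad a b c (pvExpSearch a b c lim lo hi fuel).2 ∧
       (pvExpSearch a b c lim lo hi fuel).2 ≤ hi * 2 ^ fuel) := by
  intro fuel
  induction fuel with
  | zero =>
    intro lo hi h1 hlh hPlo hMf
    simp only [pvExpSearch]
    simp only [pow_zero, mul_one] at hMf
    exact ⟨h1, hlh, hPlo, hM hi hMf, by simp⟩
  | succ fuel ih =>
    intro lo hi h1 hlh hPlo hMf
    simp only [pvExpSearch]
    by_cases hP : pvQuad a b c hi ≤ lim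
    · rw [if_pos hP]
      have h2 : (2 : Int) ^ (fuel + 1) = 2 ^ fuel * 2 := by rw [pow_succ]
      have := ih hi (hi * 2) (by omega) (by omega) hP (by rw [h2] at hMf; linarith)
      refine ⟨this.1, this.2.1, this.2.2.1, this.2.2.2.1, ?_⟩
      have := this.2.2.2.2
      rw [h2]
      linarith
    · rw [if_neg hP]
      have h20 : (0 : Int) < 2 ^ (fuel + 1) := by positivity
      exact ⟨h1, hlh, hPlo, lt_of_not_ge hP, by nlinarith⟩
  
-- bisection keeps f(lo) ≤ lim < f(hi) and returns the last feasible width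
lemma pv_bin_char (a b c lim : Int) :
    ∀ (fuel : Nat) (lo hi : Int), 1 ≤ lo → lo < hi → pvQuad a b c lo ≤ lim →
      lim < pvQuad a b c hi → hi - lo ≤ 2 ^ fuel →
      (1 ≤ pvBinSearch a b c lim lo hi fuel ∧
       pvQuad a b c (pvBinSearch a b c lim lo hi fuel) ≤ lim ∧
       lim < pvQuad a b c (pvBinSearch a b c lim lo hi fuel + 1)) := by
  intro fuel
  induction fuel with
  | zero =>
    intro lo hi h1 hlh hPlo hPhi hgap
    simp only [pvBinSearch]
    have hz : (2 : Int) ^ (0 : Nat) = 1 := pow_zero 2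
    have : hi = lo + 1 := by omega
    subst this
    exact ⟨h1, hPlo, hPhi⟩
  | succ fuel ih =>
    intro lo hi h1 hlh hPlo hPhi hgap
    simp only [pvBinSearch]
    by_cases hc : lo + 1 < hi
    · rw [if_pos hc]
      have hfd : PySem.Int.floordiv (lo + hi) 2 = (lo + hi) / 2 :=
        PySem.Int.floordiv_eq_ediv_of_pos (by norm_num)
      have h2 : (2 : Int) ^ (fuel + 1) = 2 ^ fuel * 2 := by rw [pow_succ]
      rw [h2] at hgap
      have hmid1 : lo < PySem.Int.floordiv (lo + hi) 2 := by rw [hfd]; omega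
      have hmid2 : PySem.Int.floordiv (lo + hi) 2 < hi := by rw [hfd]; omega
      have hg1 : hi - PySem.Int.floordiv (lo + hi) 2 ≤ 2 ^ fuel := by rw [hfd]; omega
      have hg2 : PySem.Int.floordiv (lo + hi) 2 - lo ≤ 2 ^ fuel := by rw [hfd]; omega
      by_cases hP : pvQuad a b c (PySem.Int.floordiv (lo + hi) 2) ≤ lim
      · rw [if_pos hP]
        exact ih _ hi (by omega) hmid2 hP hPhi hg1
      · rw [if_neg hP]
        exact ih lo _ h1 hmid1 hPlo (by omega) hg2
    · rw [if_neg hc]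
      have : hi = lo + 1 := by omega
      subst this
      exact ⟨h1, hPlo, hPhi⟩

-- uniqueness of the last feasible width, by convexity
lemma pv_res_unique (a b c lim r s : Int) (ha : 0 ≤ a)
    (hr1 : 1 ≤ r) (hrP : pvQuad a b c r ≤ lim) (hrN : lim < pvQuad a b c (r + 1))
    (hs1 : 1 ≤ s) (hsP : pvQuad a b c s ≤ lim) (hsN : lim < pvQuad a b c (s + 1))
    (h1 : pvQuad a b c 1 ≤ lim) : r = s := by
  by_contra hne
  rcases lt_or_gt_of_ne hne with h | h
  · have := pv_quad_interval a b c lim (r + 1) s ha (by omega) (by omega) h1 hsP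
    omega
  · have := pv_quad_interval a b c lim (s + 1) r ha (by omega) (by omega) h1 hrP
    omega

-- ===== VERDICT (by name: the statement is the Claim_ definition above) =====
theorem get_units_equal_spec : Claim_equal_get_units_equal := by
  intro i o d lim hDom hPre
  unfold Spec_get_units_equal get_units_equal get_units_equal_alt
  have hDom' : |i| ≤ 2147483648 ∧ |o| ≤ 2147483648 ∧ |d| ≤ 2147483648 ∧ |lim| ≤ 2147483648 := by
    unfold Dom_get_units_equal pvDomInt at hDom
    simp only [Bool.and_eq_true, decide_eq_true_eq] at hDom
    refine ⟨abs_le.mpr ⟨hDom.1.1.1.1, hDom.1.1.1.2⟩, abs_le.mpr ⟨hDom.1.1.2.1, hDom.1.1.2.2⟩,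
      abs_le.mpr ⟨hDom.1.2.1, hDom.1.2.2⟩, abs_le.mpr ⟨hDom.2.1, hDom.2.2⟩⟩
  by_cases hd0 : d ≤ 0
  · -- depth ≤ 0 : A breaks on the first test (Pre_ guarantees it) and returns [i, o]
    rw [if_pos hd0]
    have hdn : d.toNat = 0 := by omega
    simp [hdn]
  · -- depth ≥ 1
    rw [if_neg (by omega)]
    dsimp only
    have habs : |i + d + o| ≤ |i| + |d| + |o| :=
      le_trans (abs_add_le (i + d) o) (by have := abs_add_le i d; omega)
    by_cases hP1 : pvQuad (d - 1) (i + d + o) o 1 ≤ lim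
    · -- main case: the scan runs; both sides return the last feasible width
      have hab : 1 ≤ d - 1 ∨ 1 ≤ i + d + o := by
        rcases hPre with ⟨h1, _⟩ | ⟨h1, _⟩ | ⟨h1, h2⟩ | h1
        · omega
        · omega
        · subst h1
          rcases h2 with h2 | h2
          · right; omega
          · exfalso
            unfold pvQuad at hP1
            nlinarith
        · left; omega
      have hM : ∀ t, |i + d + o| + |o| + |lim| + 1 ≤ t →
          lim < pvQuad (d - 1) (i + d + o) o t :=
        fun t ht => pv_quad_big (d - 1) (i + d + o) o lim (by omega) hab t ht
      -- A side
      have hF : ((pvAFuel i o d lim : Nat) : Int) = |i| + 2 * |o| + |d| + |lim| + 4 := by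
        unfold pvAFuel
        push_cast
        rw [Int.toNat_of_nonneg (by positivity)]
      have hA := pv_aloop_char i o d lim (by omega) (|i + d + o| + |o| + |lim| + 1) hM
        (pvAFuel i o d lim) 1 (by omega) (by omega) (by rw [hF]; omega)
      rw [show (1 : Int) - 1 = 0 from by norm_num] at hA
      rcases hA with ⟨_, hcon⟩ | ⟨hr1, hrP, hrN⟩
      · omega
      · -- B side
        rw [if_neg (by omega)]
        have hMhi : |i + d + o| + |o| + |lim| + 1 ≤ 2 * 2 ^ (70 : Nat) := by
          have h2 : (2 : Int) * 2 ^ (70 : Nat) = 2361183241434822606848 := by norm_num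
          rw [h2]
          omega
        have hE := pv_exp_char (d - 1) (i + d + o) o lim
          (|i + d + o| + |o| + |lim| + 1) hM 70 1 2 (by omega) (by omega) hP1 hMhi
        have hB := pv_bin_char (d - 1) (i + d + o) o lim 80
          (pvExpSearch (d - 1) (i + d + o) o lim 1 2 70).1
          (pvExpSearch (d - 1) (i + d + o) o lim 1 2 70).2
          hE.1 hE.2.1 hE.2.2.1 hE.2.2.2.1
          (by
            have hhi := hE.2.2.2.2
            have h1 := hE.1
            have hlh := hE.2.1
            have h2 : (2 : Int) * 2 ^ (70 : Nat) ≤ 2 ^ (80 : Nat) := by norm_num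
            omega)
        have heq := pv_res_unique (d - 1) (i + d + o) o lim
          (pvALoop i o d lim 0 1 (pvAFuel i o d lim))
          (pvBinSearch (d - 1) (i + d + o) o lim
            (pvExpSearch (d - 1) (i + d + o) o lim 1 2 70).1
            (pvExpSearch (d - 1) (i + d + o) o lim 1 2 70).2 80)
          (by omega) hr1 hrP hrN hB.1 hB.2.1 hB.2.2 hP1
        rw [heq]
    · -- f(1) > lim : A breaks at once, B takes the 'best = 0' branch
      have hfuel : ∃ f', pvAFuel i o d lim = f' + 1 :=
        ⟨(|i| + 2 * |o| + |d| + |lim|).toNat + 3, rfl⟩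
      obtain ⟨f', hf'⟩ := hfuel
      rw [hf', pv_aloop_break1 i o d lim (by omega) f' (by omega), if_pos (by omega)]
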